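-- pv_equiv track=rewrite | github.com/Fondamenti18/fondamenti-di-programmazione | students/1796443/homework02/program01.py | mod_lista
-- ===== SOURCE A (Python) =====
-- def mod_lista(ls):
--     c=0
--     for l in ls:
--         j=0
--         for s1 in l:
--             controllo=True
--             s=''
--             i=1
--             for a in s1:
--                 if j==0:
--                     s=s+a
--                 elif a.isalpha() and controllo and i!=len(s1):
--                     if ord(a)<97:
--                         a=chr(ord(a)+32)
--                     s=s+a
--                 elif i==len(s1):
--                     if a.isalpha():
--                         if ord(a)<97:
--                             a=chr(ord(a)+32)
--                         s=s+a
--                 else: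
--                     s=''
--                     controllo=False
--                 i+=1
--             ls[c][j]=s
--             j+=1
--         c+=1
--     return ls
-- ===== SOURCE B (Python) =====
-- def _low(a):
--     return chr(ord(a) + 32) if ord(a) < 97 else a
--
--
-- def _transform(s1):
--     if not s1:
--         return ''
--     head, last = s1[:-1], s1[-1]
--     tail = _low(last) if last.isalpha() else ''
--     if all(a.isalpha() for a in head):
--         return ''.join(_low(a) for a in head) + tail
--     return tail
--
--
-- def mod_lista(ls):
--     for l in ls:
--         for j, s1 in enumerate(l):
--             if j != 0:
--                 l[j] = _transform(s1)
--     return ls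
-- ===== Notes on version B (the rewrite author's own statement) =====
-- stated objective: simpler
-- what changed: Replaces A's three-branch character loop with mutable state (s, controllo, i) by a per-string helper that computes once whether all chars of s1[:-1] are alphabetic and assembles the result from slices; nested list handled by enumerate.
import Mathlib
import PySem

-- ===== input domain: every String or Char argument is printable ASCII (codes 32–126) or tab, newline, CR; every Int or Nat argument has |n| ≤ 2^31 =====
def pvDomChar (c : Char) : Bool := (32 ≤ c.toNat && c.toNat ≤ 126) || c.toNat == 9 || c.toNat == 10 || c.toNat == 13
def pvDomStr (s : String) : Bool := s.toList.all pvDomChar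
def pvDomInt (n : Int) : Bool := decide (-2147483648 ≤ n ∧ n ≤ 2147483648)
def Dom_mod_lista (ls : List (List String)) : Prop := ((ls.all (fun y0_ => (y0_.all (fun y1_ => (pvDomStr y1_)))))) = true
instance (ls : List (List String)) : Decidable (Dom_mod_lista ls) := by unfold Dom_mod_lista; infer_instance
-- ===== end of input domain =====

-- B is a simpler decomposition: a per-string helper replaces A's three-branch stateful char loop;
-- return-value equivalence only (both Pythons mutate ls in place the same way).

-- ===== PORT A =====
-- A's per-character loop: state (s, controllo, i), j==0 handled by the jzero flag
def pvLoopA (jzero : Bool) (n : Nat) : List Char → List Char → Bool → Nat → List Char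
  | [], s, _, _ => s
  | a :: rest, s, controllo, i =>
    if jzero then pvLoopA jzero n rest (s ++ [a]) controllo (i + 1)
    else if PySem.Chars.isalpha a && controllo && decide (i ≠ n) then
      pvLoopA jzero n rest (s ++ [if a.toNat < 97 then Char.ofNat (a.toNat + 32) else a]) controllo (i + 1)
    else if i = n then
      if PySem.Chars.isalpha a then
        pvLoopA jzero n rest (s ++ [if a.toNat < 97 then Char.ofNat (a.toNat + 32) else a]) controllo (i + 1)
      else pvLoopA jzero n rest s controllo (i + 1)
    else pvLoopA jzero n rest [] false (i + 1)

def mod_lista (ls : List (List String)) : List (List String) :=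
  (ls.foldl (fun (acc : List (List String) × Nat) l =>
      (acc.1 ++ [(l.foldl (fun (acc2 : List String × Nat) s1 =>
          (acc2.1 ++ [String.ofList (pvLoopA (acc2.2 == 0) s1.toList.length s1.toList [] true 1)],
           acc2.2 + 1)) ([], 0)).1],
       acc.2 + 1)) ([], 0)).1

-- ===== PORT B =====
def pvLowB (a : Char) : Char := if a.toNat < 97 then Char.ofNat (a.toNat + 32) else a

def pvTransformB (s1 : String) : String :=
  if s1.toList = [] then ""
  else
    let head := s1.toList.dropLast
    let last := s1.toList.getLast!
    let tail := if PySem.Chars.isalpha last then [pvLowB last] else []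
    if head.all PySem.Chars.isalpha then String.ofList (head.map pvLowB ++ tail) else String.ofList tail

def mod_lista_alt (ls : List (List String)) : List (List String) :=
  ls.map (fun l =>
    (PySem.List.enumerate l 0).map (fun p => if p.1 = 0 then p.2 else pvTransformB p.2))

-- ===== PRECONDITION & SPEC =====
def Spec_mod_lista (ls : List (List String)) (out : List (List String)) : Prop := out = mod_lista_alt ls
instance (ls : List (List String)) (out : List (List String)) : Decidable (Spec_mod_lista ls out) := by unfold Spec_mod_lista; infer_instance

-- ===== CLAIM (what is proved, stated in full; the proofs are below) =====
def Claim_equal_mod_lista : Prop := ∀ (ls : List (List String)), Dom_mod_lista ls → Spec_mod_lista ls (mod_lista ls)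

-- ===== LEMMAS AND PROOFS =====

theorem pvLoopA_jzero (cs s : List Char) (n : Nat) (c : Bool) (i : Nat) :
    pvLoopA true n cs s c i = s ++ cs := by
  induction cs generalizing s i with
  | nil => simp [pvLoopA]
  | cons a rest ih => simp [pvLoopA, ih]

theorem pvLoopA_main (n : Nat) (cs s : List Char) (c : Bool) (i : Nat)
    (hne : cs ≠ []) (hlen : i + cs.length = n + 1) (hc : c = false → s = []) :
    pvLoopA false n cs s c i =
      (if c && cs.dropLast.all PySem.Chars.isalpha then s ++ cs.dropLast.map pvLowB else []) ++
      (if PySem.Chars.isalpha cs.getLast! then [pvLowB cs.getLast!] else []) := by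
  induction cs generalizing s c i with
  | nil => exact absurd rfl hne
  | cons a rest ih =>
    cases rest with
    | nil =>
      have hi : i = n := by simp at hlen; omega
      cases c with
      | false =>
        have hs := hc rfl
        subst hs hi
        by_cases ha : PySem.Chars.isalpha a = true <;>
          simp [pvLoopA, ha, pvLowB, List.getLast!]
      | true =>
        subst hi
        by_cases ha : PySem.Chars.isalpha a = true <;>
          simp [pvLoopA, ha, pvLowB, List.getLast!]
    | cons b rest' =>
      have hin : i ≠ n := by simp at hlen; omega
      have hlen' : (i + 1) + (b :: rest').length = n + 1 := by simp at hlen ⊢; omega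
      have hgl : (a :: b :: rest').getLast! = (b :: rest').getLast! := by
        simp [List.getLast!]
      by_cases hac : PySem.Chars.isalpha a = true ∧ c = true
      · obtain ⟨ha, hcc⟩ := hac
        subst hcc
        rw [show pvLoopA false n (a :: b :: rest') s true i
              = pvLoopA false n (b :: rest') (s ++ [pvLowB a]) true (i + 1) by
            simp [pvLoopA, ha, hin, pvLowB]]
        rw [ih (s ++ [pvLowB a]) true (i + 1) (by simp) hlen' (by simp)]
        rw [hgl]
        by_cases hall : (b :: rest').dropLast.all PySem.Chars.isalpha = true <;>
          simp [List.dropLast, ha, hall]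
      · have hstep : pvLoopA false n (a :: b :: rest') s c i
            = pvLoopA false n (b :: rest') [] false (i + 1) := by
          rcases Bool.eq_false_or_eq_true (PySem.Chars.isalpha a) with h1 | h1 <;>
          rcases Bool.eq_false_or_eq_true c with h2 | h2 <;>
            simp [pvLoopA, h1, h2, hin] at hac ⊢
        rw [hstep, ih [] false (i + 1) (by simp) hlen' (fun _ => rfl)]
        rw [hgl]
        rcases Bool.eq_false_or_eq_true c with h2 | h2
        · have h1 : PySem.Chars.isalpha a = false := by
            rcases Bool.eq_false_or_eq_true (PySem.Chars.isalpha a) with h | h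
            · exact absurd ⟨h, h2⟩ hac
            · exact h
          simp [h2, List.dropLast, h1]
        · simp [h2]

theorem pvString_lemma (j : Nat) (s1 : String) :
    String.ofList (pvLoopA (j == 0) s1.toList.length s1.toList [] true 1) =
      if j = 0 then s1 else pvTransformB s1 := by
  by_cases hj : j = 0
  · subst hj
    simp [pvLoopA_jzero]
  · have hjb : (j == 0) = false := by simpa using hj
    rw [hjb]
    by_cases hnil : s1.toList = []
    · simp [pvTransformB, hnil, hj, pvLoopA]
    · rw [pvLoopA_main s1.toList.length s1.toList [] true 1 hnil
        (by have := List.length_pos_iff.mpr hnil; omega) (by simp)]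
      simp only [pvTransformB, hnil, if_neg hj]
      by_cases hall : s1.toList.dropLast.all PySem.Chars.isalpha = true <;>
        simp [hall]

theorem pvInner (l : List String) (init : List String) (j : Nat) :
    (l.foldl (fun (acc2 : List String × Nat) s1 =>
        (acc2.1 ++ [String.ofList (pvLoopA (acc2.2 == 0) s1.toList.length s1.toList [] true 1)],
         acc2.2 + 1)) (init, j)).1
      = init ++ (PySem.List.enumerate l (j : Int)).map
          (fun p => if p.1 = 0 then p.2 else pvTransformB p.2) := by
  induction l generalizing init j with
  | nil => simp [PySem.List.enumerate_nil]
  | cons s1 rest ih =>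
    simp only [List.foldl_cons, PySem.List.enumerate_cons, List.map_cons]
    rw [ih (init ++ [String.ofList (pvLoopA (j == 0) s1.toList.length s1.toList [] true 1)]) (j + 1)]
    have : ((j : Int) = 0) ↔ (j = 0) := by omega
    rw [pvString_lemma j s1]
    push_cast
    simp only [this]
    by_cases hj : j = 0 <;> simp [hj]

theorem pvOuter (ls : List (List String)) (init : List (List String)) (c : Nat) :
    (ls.foldl (fun (acc : List (List String) × Nat) l =>
        (acc.1 ++ [(l.foldl (fun (acc2 : List String × Nat) s1 =>
            (acc2.1 ++ [String.ofList (pvLoopA (acc2.2 == 0) s1.toList.length s1.toList [] true 1)],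
             acc2.2 + 1)) ([], 0)).1],
         acc.2 + 1)) (init, c)).1
      = init ++ ls.map (fun l =>
          (PySem.List.enumerate l 0).map (fun p => if p.1 = 0 then p.2 else pvTransformB p.2)) := by
  induction ls generalizing init c with
  | nil => simp
  | cons l rest ih =>
    simp only [List.foldl_cons, List.map_cons]
    rw [ih, pvInner l [] 0]
    simp

-- ===== VERDICT (by name: the statement is the Claim_ definition above) =====
theorem mod_lista_spec : Claim_equal_mod_lista := by
  intro ls _
  show mod_lista ls = mod_lista_alt ls
  unfold mod_lista mod_lista_alt
  rw [pvOuter ls [] 0]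
  simp
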